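-- pv_equiv track=rewrite | github.com/jamil-said/code-samples | Python_code_challenges/minimumLengthUniqueWindow.py | createWin
-- ===== SOURCE A (Python) =====
-- def createWin(arr):
--     dic, res, start, end, count = {}, [], 0, -1, 1
--     for idx, ele in enumerate(arr):
--         if ele in dic: dic[ele].append(idx)
--         else: dic[ele] = [idx]
--     while start < len(arr):
--         if start == end:
--             res.append(count)
--             start += 1
--             end, count = -1, 1
--         elif end == -1 and len(dic[arr[start]]) == 1:
--             start += 1
--             count = 1
--             res.append(1)
--         elif end == -1:
--             end = dic[arr[start]][-1]
--             start += 1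
--             count += 1
--         else:
--             if dic[arr[start]][-1] > end:
--                 end = dic[arr[start]][-1]
--             start += 1
--             count += 1
--     return res
-- ===== SOURCE B (Python) =====
-- def createWin(arr):
--     # Counting approach: no occurrence indices at all.  Count each value's
--     # occurrences, then scan once decrementing a remaining-count table while
--     # keeping `active` = number of distinct values that have started but not
--     # yet exhausted their occurrences; a window closes exactly when active==0.
--     total = {}
--     for x in arr:
--         total[x] = total.get(x, 0) + 1
--     rem = dict(total)
--     res, active, start = [], 0, 0
--     for i, x in enumerate(arr):
--         if rem[x] == total[x]:
--             active += 1
--         rem[x] -= 1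
--         if rem[x] == 0:
--             active -= 1
--         if active == 0:
--             res.append(i - start + 1)
--             start = i + 1
--     return res
-- ===== Notes on version B (the rewrite author's own statement) =====
-- stated objective: alternative
-- what changed: Replaces A's occurrence-index-list dict and 4-branch while-loop state machine (which tracks the farthest last-occurrence index) by an occurrence-counting algorithm: one pass builds per-value totals, a second pass decrements a remaining-count table and maintains an active counter of values seen but not yet exhausted, emitting a window length exactly when active hits 0; no positions/last indices are stored at all.
import Mathlib
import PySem

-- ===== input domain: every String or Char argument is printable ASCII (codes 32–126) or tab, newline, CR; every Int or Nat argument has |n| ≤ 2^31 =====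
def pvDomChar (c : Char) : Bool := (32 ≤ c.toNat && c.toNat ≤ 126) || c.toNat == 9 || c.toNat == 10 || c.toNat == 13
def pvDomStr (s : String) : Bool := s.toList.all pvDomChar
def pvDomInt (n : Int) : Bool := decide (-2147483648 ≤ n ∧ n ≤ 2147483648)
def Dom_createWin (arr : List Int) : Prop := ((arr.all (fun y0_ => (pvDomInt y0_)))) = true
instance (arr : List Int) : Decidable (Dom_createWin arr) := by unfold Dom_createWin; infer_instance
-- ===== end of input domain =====

-- B replaces A's occurrence-index-list dict + 4-branch sentinel state machine by an
-- occurrence-COUNTING algorithm: per-value totals, a remaining-count table and an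
-- 'active' counter of values seen but not exhausted; a window closes when active = 0.

-- ===== PORT A =====
def pvBuildDic (arr : List Int) : PySem.Dict Int (List Int) :=
  (PySem.List.enumerate arr 0).foldl
    (fun dic p =>
      if dic.contains p.2 then dic.insert p.2 (dic.getD p.2 [] ++ [p.1])
      else dic.insert p.2 [p.1])
    PySem.Dict.empty

def pvLoopA (arr : List Int) (dic : PySem.Dict Int (List Int))
    (res : List Int) (start endv count : Int) : List Int :=
  if h : start < (arr.length : Int) then
    if start = endv then
      pvLoopA arr dic (res ++ [count]) (start + 1) (-1) 1
    else if endv = -1 ∧ (dic.getD (PySem.List.pyGetD arr start 0) []).length = 1 then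
      pvLoopA arr dic (res ++ [1]) (start + 1) endv 1
    else if endv = -1 then
      pvLoopA arr dic res (start + 1)
        (PySem.List.pyGetD (dic.getD (PySem.List.pyGetD arr start 0) []) (-1) 0) (count + 1)
    else
      let lastv := PySem.List.pyGetD (dic.getD (PySem.List.pyGetD arr start 0) []) (-1) 0
      pvLoopA arr dic res (start + 1) (if lastv > endv then lastv else endv) (count + 1)
  else res
termination_by ((arr.length : Int) - start).toNat
decreasing_by all_goals omega

def createWin (arr : List Int) : List Int :=
  pvLoopA arr (pvBuildDic arr) [] 0 (-1) 1

-- ===== PORT B =====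
def pvBuildTotal (arr : List Int) : PySem.Dict Int Int :=
  arr.foldl (fun d x => d.insert x (d.getD x 0 + 1)) PySem.Dict.empty

def pvLoopC (total : PySem.Dict Int Int) (l : List (Int × Int))
    (rem : PySem.Dict Int Int) (res : List Int) (active start : Int) : List Int :=
  match l with
  | [] => res
  | p :: t =>
    let a1 := if rem.getD p.2 0 = total.getD p.2 0 then active + 1 else active
    let rem' := rem.insert p.2 (rem.getD p.2 0 - 1)
    let a2 := if rem'.getD p.2 0 = 0 then a1 - 1 else a1
    if a2 = 0 then pvLoopC total t rem' (res ++ [p.1 - start + 1]) a2 (p.1 + 1)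
    else pvLoopC total t rem' res a2 start

def createWin_alt (arr : List Int) : List Int :=
  pvLoopC (pvBuildTotal arr) (PySem.List.enumerate arr 0) (pvBuildTotal arr) [] 0 0

-- ===== PRECONDITION & SPEC =====
def Spec_createWin (arr : List Int) (out : List Int) : Prop := out = createWin_alt arr
instance (arr : List Int) (out : List Int) : Decidable (Spec_createWin arr out) := by unfold Spec_createWin; infer_instance

-- ===== CLAIM (what is proved, stated in full; the proofs are below) =====
def Claim_equal_createWin : Prop := ∀ (arr : List Int), Dom_createWin arr → Spec_createWin arr (createWin arr)

-- ===== LEMMAS AND PROOFS =====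

-- occurrence-index list of x in arr (what A's dict stores at key x)
def pvOcc (arr : List Int) (x : Int) : List Int :=
  ((PySem.List.enumerate arr 0).filter (fun p => p.2 = x)).map (·.1)

-- last occurrence index of arr[i]
def pvL (arr : List Int) (i : Nat) : Int := (pvOcc arr (arr.getD i 0)).getLastD 0

-- distinct values crossing the cut before position i
def pvCross (arr : List Int) (i : Nat) : Finset Int :=
  (arr.take i).toFinset ∩ (arr.drop i).toFinset

theorem pvFoldDic_getD (ps : List (Int × Int)) : ∀ (d : PySem.Dict Int (List Int)) (x : Int),
    (ps.foldl (fun dic p => if dic.contains p.2 then dic.insert p.2 (dic.getD p.2 [] ++ [p.1])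
        else dic.insert p.2 [p.1]) d).getD x []
      = d.getD x [] ++ ((ps.filter (fun p => p.2 = x)).map (·.1)) := by
  induction ps with
  | nil => intro d x; simp
  | cons p t ih =>
    intro d x
    have hstep : (if d.contains p.2 then d.insert p.2 (d.getD p.2 [] ++ [p.1])
        else d.insert p.2 [p.1]) = d.insert p.2 (d.getD p.2 [] ++ [p.1]) := by
      by_cases h : d.contains p.2
      · simp [h]
      · have h' : d.contains p.2 = false := by simpa using h
        simp [h', PySem.Dict.getD_of_not_contains d [] h']
    simp only [List.foldl_cons, hstep, ih]
    by_cases hx : p.2 = x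
    · subst hx
      simp [PySem.Dict.getD_insert_self]
    · rw [PySem.Dict.getD_insert_of_ne _ _ _ (fun h => hx h.symm)]
      simp [hx]

theorem pvBuildDic_getD (arr : List Int) (x : Int) :
    (pvBuildDic arr).getD x [] = pvOcc arr x := by
  unfold pvBuildDic pvOcc
  rw [pvFoldDic_getD]
  simp [pysem]

theorem pvBuildTotal_getD (arr : List Int) (x : Int) :
    (pvBuildTotal arr).getD x 0 = (arr.count x : Int) := by
  unfold pvBuildTotal
  rw [PySem.Dict.foldl_insert_getD_add_one_eq_counter, PySem.Dict.getD_counter]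

theorem pvMem_enum (arr : List Int) : ∀ (s : Int) (p : Int × Int),
    p ∈ PySem.List.enumerate arr s ↔
      ∃ k : Nat, k < arr.length ∧ p.1 = s + (k : Int) ∧ arr.getD k 0 = p.2 := by
  induction arr with
  | nil => intro s p; simp [PySem.List.enumerate_nil]
  | cons a t ih =>
    intro s p
    rw [PySem.List.enumerate_cons]
    simp only [List.mem_cons, ih]
    constructor
    · rintro (rfl | ⟨k, hk, h1, h2⟩)
      · exact ⟨0, by simp, by simp, by simp⟩
      · exact ⟨k + 1, by simpa using hk, by push_cast; omega, by simpa using h2⟩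
    · rintro ⟨k, hk, h1, h2⟩
      cases k with
      | zero =>
        left
        have hp : p = (p.1, p.2) := rfl
        rw [hp]
        simp at h1 h2
        simp [h1, h2]
      | succ k =>
        right
        exact ⟨k, by simpa using hk, by push_cast at h1 ⊢; omega, by simpa using h2⟩

theorem pvMem_occ (arr : List Int) (x j : Int) :
    j ∈ pvOcc arr x ↔ ∃ k : Nat, k < arr.length ∧ j = (k : Int) ∧ arr.getD k 0 = x := by
  unfold pvOcc
  constructor
  · intro hj
    obtain ⟨p, hp, rfl⟩ := List.mem_map.1 hj
    obtain ⟨hpe, hpx⟩ := List.mem_filter.1 hp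
    obtain ⟨k, hk, h1, h2⟩ := (pvMem_enum arr 0 p).1 hpe
    refine ⟨k, hk, by omega, ?_⟩
    rw [h2]
    exact of_decide_eq_true hpx
  · rintro ⟨k, hk, rfl, he⟩
    refine List.mem_map.2 ⟨((k : Int), x), List.mem_filter.2 ⟨?_, by simp⟩, rfl⟩
    exact (pvMem_enum arr 0 _).2 ⟨k, hk, by simp, he⟩

theorem pvEnum_pairwise (arr : List Int) (s : Int) :
    (PySem.List.enumerate arr s).Pairwise (fun p q => p.1 < q.1) := by
  have h := PySem.List.pairwise_lt_pyRange_one (a := s) (b := s + arr.length)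
  rw [← PySem.List.map_fst_enumerate arr s] at h
  exact (List.pairwise_map).1 h

theorem pvOcc_pairwise (arr : List Int) (x : Int) : (pvOcc arr x).Pairwise (· < ·) := by
  exact (List.pairwise_map).2 ((pvEnum_pairwise arr 0).filter _)

theorem pvSelf_mem_occ (arr : List Int) (i : Nat) (h : i < arr.length) :
    (i : Int) ∈ pvOcc arr (arr.getD i 0) :=
  (pvMem_occ arr _ _).2 ⟨i, h, rfl, rfl⟩

theorem pvGetLastD_mem (l : List Int) (d : Int) (h : l ≠ []) : l.getLastD d ∈ l := by
  rw [List.getLastD_eq_getLast?, List.getLast?_eq_some_getLast h]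
  exact List.getLast_mem h

theorem pvLe_getLastD : ∀ (l : List Int), l.Pairwise (· < ·) → ∀ (d j : Int), j ∈ l → j ≤ l.getLastD d := by
  intro l
  induction l with
  | nil => intro _ d j hj; cases hj
  | cons a t ih =>
    intro h d j hj
    rw [List.getLastD_cons]
    rcases List.mem_cons.1 hj with rfl | hjt
    · cases t with
      | nil => simp
      | cons b u =>
        have hmem : (b :: u).getLastD j ∈ (b :: u) := pvGetLastD_mem _ _ (by simp)
        have := (List.pairwise_cons.1 h).1 _ hmem
        omega
    · exact ih (List.pairwise_cons.1 h).2 a j hjt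

theorem pvL_ge (arr : List Int) (i : Nat) (h : i < arr.length) : (i : Int) ≤ pvL arr i :=
  pvLe_getLastD _ (pvOcc_pairwise arr _) 0 _ (pvSelf_mem_occ arr i h)

theorem pvL_isLast (arr : List Int) (i j : Nat) (hj : j < arr.length)
    (he : arr.getD j 0 = arr.getD i 0) : (j : Int) ≤ pvL arr i :=
  pvLe_getLastD _ (pvOcc_pairwise arr _) 0 _ ((pvMem_occ arr _ _).2 ⟨j, hj, rfl, he⟩)

theorem pvL_mem (arr : List Int) (i : Nat) (h : i < arr.length) :
    ∃ m : Nat, m < arr.length ∧ (m : Int) = pvL arr i ∧ arr.getD m 0 = arr.getD i 0 := by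
  have hne : pvOcc arr (arr.getD i 0) ≠ [] :=
    List.ne_nil_of_mem (pvSelf_mem_occ arr i h)
  have hmem : (pvOcc arr (arr.getD i 0)).getLastD 0 ∈ pvOcc arr (arr.getD i 0) :=
    pvGetLastD_mem _ 0 hne
  obtain ⟨k, hk, hjk, he⟩ := (pvMem_occ arr _ _).1 hmem
  exact ⟨k, hk, hjk.symm, he⟩

theorem pvL_lt_len (arr : List Int) (i : Nat) (h : i < arr.length) :
    pvL arr i < (arr.length : Int) := by
  obtain ⟨m, hm, he, _⟩ := pvL_mem arr i h
  omega

theorem pvL_congr (arr : List Int) (i j : Nat) (he : arr.getD j 0 = arr.getD i 0) :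
    pvL arr j = pvL arr i := by
  unfold pvL
  rw [he]

theorem pvOcc_len_one (arr : List Int) (i : Nat) (h : i < arr.length) :
    (pvOcc arr (arr.getD i 0)).length = 1 ↔
      ∀ j : Nat, j < arr.length → arr.getD j 0 = arr.getD i 0 → j = i := by
  constructor
  · intro h1 j hj he
    obtain ⟨a, ha⟩ := List.length_eq_one_iff.1 h1
    have hi' := pvSelf_mem_occ arr i h
    have hj' : (j : Int) ∈ pvOcc arr (arr.getD i 0) := (pvMem_occ arr _ _).2 ⟨j, hj, rfl, he⟩
    rw [ha] at hi' hj'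
    simp at hi' hj'
    omega
  · intro hu
    have hi' := pvSelf_mem_occ arr i h
    cases hoc : pvOcc arr (arr.getD i 0) with
    | nil => rw [hoc] at hi'; cases hi'
    | cons a t =>
      cases t with
      | nil => rfl
      | cons b u =>
        exfalso
        have hpw := pvOcc_pairwise arr (arr.getD i 0)
        rw [hoc] at hpw
        have hab : a < b := (List.pairwise_cons.1 hpw).1 b (by simp)
        have ha : a ∈ pvOcc arr (arr.getD i 0) := by rw [hoc]; simp
        have hb : b ∈ pvOcc arr (arr.getD i 0) := by rw [hoc]; simp
        obtain ⟨ka, hka, rfl, hea⟩ := (pvMem_occ arr _ _).1 ha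
        obtain ⟨kb, hkb, rfl, heb⟩ := (pvMem_occ arr _ _).1 hb
        have := hu ka hka hea
        have := hu kb hkb heb
        omega

theorem pvEnum_getElem (arr : List Int) (i : Nat) (h : i < arr.length) :
    (PySem.List.enumerate arr 0)[i]'(by simpa [PySem.List.length_enumerate] using h)
      = ((i : Int), arr.getD i 0) := by
  have hlen : i < (PySem.List.enumerate arr 0).length := by
    simpa [PySem.List.length_enumerate] using h
  have hp : (PySem.List.enumerate arr 0)[i]? = some ((PySem.List.enumerate arr 0)[i]) :=
    List.getElem?_eq_getElem hlen
  have e1 : ((PySem.List.enumerate arr 0)[i]?).map (·.1) = some (i : Int) := by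
    rw [← List.getElem?_map, PySem.List.map_fst_enumerate]
    rw [List.getElem?_eq_getElem (by simpa [PySem.List.length_pyRange_one] using h)]
    rw [PySem.List.getElem_pyRange_one]
    simp
  have e2 : ((PySem.List.enumerate arr 0)[i]?).map (·.2) = some (arr.getD i 0) := by
    rw [← List.getElem?_map, PySem.List.map_snd_enumerate]
    rw [List.getElem?_eq_getElem h, List.getD_eq_getElem arr 0 h]
  rw [hp] at e1 e2
  simp only [Option.map_some, Option.some.injEq] at e1 e2
  exact Prod.ext e1 e2

theorem pvEnum_drop (arr : List Int) (i : Nat) (h : i < arr.length) :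
    (PySem.List.enumerate arr 0).drop i
      = ((i : Int), arr.getD i 0) :: (PySem.List.enumerate arr 0).drop (i + 1) := by
  have hlen : i < (PySem.List.enumerate arr 0).length := by
    simpa [PySem.List.length_enumerate] using h
  rw [List.drop_eq_getElem_cons hlen, pvEnum_getElem arr i h]

theorem pvPyGetD_neg_one_getLastD (l : List Int) (h : l ≠ []) :
    PySem.List.pyGetD l (-1) 0 = l.getLastD 0 := by
  simp [pysem, h, List.getLastD_eq_getLast?, List.getLast?_eq_some_getLast h]

theorem pvNeg_one_occ (arr : List Int) (i : Nat) (h : i < arr.length) :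
    PySem.List.pyGetD (pvOcc arr (arr.getD i 0)) (-1) 0 = pvL arr i := by
  have hne : pvOcc arr (arr.getD i 0) ≠ [] :=
    List.ne_nil_of_mem (pvSelf_mem_occ arr i h)
  unfold pvL
  exact pvPyGetD_neg_one_getLastD _ hne

-- element-wise descriptions of take/drop membership
theorem pvMem_take (arr : List Int) (m : Nat) (x : Int) :
    x ∈ arr.take m ↔ ∃ j : Nat, j < m ∧ j < arr.length ∧ arr.getD j 0 = x := by
  rw [List.mem_iff_getElem]
  constructor
  · rintro ⟨k, hk, he⟩
    have hk' : k < m ∧ k < arr.length := by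
      have := hk; rw [List.length_take] at this; omega
    refine ⟨k, hk'.1, hk'.2, ?_⟩
    rw [List.getD_eq_getElem arr 0 hk'.2, ← he, List.getElem_take]
  · rintro ⟨j, hjm, hjl, he⟩
    refine ⟨j, by rw [List.length_take]; omega, ?_⟩
    rw [List.getElem_take, ← List.getD_eq_getElem arr 0 hjl, he]

theorem pvMem_drop (arr : List Int) (m : Nat) (x : Int) :
    x ∈ arr.drop m ↔ ∃ j : Nat, m ≤ j ∧ j < arr.length ∧ arr.getD j 0 = x := by
  rw [List.mem_iff_getElem]
  constructor
  · rintro ⟨k, hk, he⟩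
    have hk' : m + k < arr.length := by
      have := hk; rw [List.length_drop] at this; omega
    refine ⟨m + k, by omega, hk', ?_⟩
    rw [List.getD_eq_getElem arr 0 hk', ← he, List.getElem_drop]
  · rintro ⟨j, hjm, hjl, he⟩
    refine ⟨j - m, by rw [List.length_drop]; omega, ?_⟩
    have : m + (j - m) = j := by omega
    rw [List.getElem_drop, ← List.getD_eq_getElem arr 0 (by omega), this, he]

-- the cardinality bookkeeping of one counting step
theorem pvCardStep (T D : Finset Int) (x : Int) :
    ((((T ∪ {x}) ∩ D).card : Int))
      = ((T ∩ insert x D).card : Int)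
        + (if x ∈ T then 0 else 1) - (if x ∈ D then 0 else 1) := by
  by_cases h1 : x ∈ T <;> by_cases h2 : x ∈ D
  · have e1 : T ∪ {x} = T := by
      apply Finset.union_eq_left.2; simp [h1]
    have e2 : insert x D = D := Finset.insert_eq_self.2 h2
    rw [e1, e2]; simp [h1, h2]
  · have e1 : T ∪ {x} = T := by
      apply Finset.union_eq_left.2; simp [h1]
    have e2 : T ∩ insert x D = insert x (T ∩ D) := by
      ext y; simp only [Finset.mem_inter, Finset.mem_insert]
      constructor
      · rintro ⟨hy, rfl | hy2⟩
        · exact Or.inl rfl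
        · exact Or.inr ⟨hy, hy2⟩
      · rintro (rfl | ⟨hy, hy2⟩)
        · exact ⟨h1, Or.inl rfl⟩
        · exact ⟨hy, Or.inr hy2⟩
    have hx : x ∉ T ∩ D := by simp [h2]
    rw [e1, e2, Finset.card_insert_of_notMem hx]
    simp [h1, h2]
  · have e1 : (T ∪ {x}) ∩ D = insert x (T ∩ D) := by
      ext y; simp only [Finset.mem_inter, Finset.mem_union, Finset.mem_insert,
        Finset.mem_singleton]
      constructor
      · rintro ⟨hy1 | rfl, hy2⟩
        · exact Or.inr ⟨hy1, hy2⟩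
        · exact Or.inl rfl
      · rintro (rfl | ⟨hy1, hy2⟩)
        · exact ⟨Or.inr rfl, h2⟩
        · exact ⟨Or.inl hy1, hy2⟩
    have e2 : insert x D = D := Finset.insert_eq_self.2 h2
    have hx : x ∉ T ∩ D := by simp [h1]
    rw [e1, e2, Finset.card_insert_of_notMem hx]
    simp [h1, h2]
  · have e1 : (T ∪ {x}) ∩ D = T ∩ D := by
      ext y; simp only [Finset.mem_inter, Finset.mem_union, Finset.mem_singleton]
      constructor
      · rintro ⟨hy1 | rfl, hy2⟩
        · exact ⟨hy1, hy2⟩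
        · exact absurd hy2 h2
      · rintro ⟨hy1, hy2⟩; exact ⟨Or.inl hy1, hy2⟩
    have e2 : T ∩ insert x D = T ∩ D := by
      ext y; simp only [Finset.mem_inter, Finset.mem_insert]
      constructor
      · rintro ⟨hy1, rfl | hy2⟩
        · exact absurd hy1 h1
        · exact ⟨hy1, hy2⟩
      · rintro ⟨hy1, hy2⟩; exact ⟨hy1, Or.inr hy2⟩
    rw [e1, e2]; simp [h1, h2]

theorem pvCross_empty_iff (arr : List Int) (i : Nat) (h : i < arr.length) :
    pvCross arr (i + 1) = ∅ ↔ ∀ j : Nat, j ≤ i → pvL arr j ≤ (i : Int) := by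
  unfold pvCross
  rw [Finset.eq_empty_iff_forall_notMem]
  constructor
  · intro hemp j hj
    by_contra hgt
    push_neg at hgt
    have hjl : j < arr.length := by omega
    obtain ⟨m, hm, hme, hmeq⟩ := pvL_mem arr j hjl
    have hmi : i + 1 ≤ m := by omega
    apply hemp (arr.getD j 0)
    rw [Finset.mem_inter, List.mem_toFinset, List.mem_toFinset]
    exact ⟨(pvMem_take arr (i + 1) _).2 ⟨j, by omega, hjl, rfl⟩,
      (pvMem_drop arr (i + 1) _).2 ⟨m, hmi, hm, hmeq⟩⟩
  · intro hall x hx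
    rw [Finset.mem_inter, List.mem_toFinset, List.mem_toFinset] at hx
    obtain ⟨j, hjm, hjl, hje⟩ := (pvMem_take arr (i + 1) x).1 hx.1
    obtain ⟨k, hkm, hkl, hke⟩ := (pvMem_drop arr (i + 1) x).1 hx.2
    have hL := pvL_isLast arr j k hkl (by rw [hke, hje])
    have := hall j (by omega)
    omega

theorem pvCount_take_add_drop (arr : List Int) (i : Nat) (y : Int) :
    (arr.take i).count y + (arr.drop i).count y = arr.count y := by
  conv_rhs => rw [← List.take_append_drop i arr]
  rw [List.count_append]

theorem pvDrop_cons (arr : List Int) (i : Nat) (h : i < arr.length) :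
    arr.drop i = arr.getD i 0 :: arr.drop (i + 1) := by
  rw [List.drop_eq_getElem_cons h, List.getD_eq_getElem arr 0 h]

theorem pvTake_succ (arr : List Int) (i : Nat) (h : i < arr.length) :
    arr.take (i + 1) = arr.take i ++ [arr.getD i 0] := by
  rw [List.take_succ, List.getElem?_eq_getElem h, List.getD_eq_getElem arr 0 h]
  rfl

-- the lockstep invariant induction: A's state machine and B's counting scan agree step for step
theorem pvLockstep (fuel : Nat) : ∀ (arr : List Int) (i anchor : Nat) (res : List Int)
    (endv count : Int) (rem : PySem.Dict Int Int) (active : Int),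
    fuel = arr.length - i →
    i ≤ arr.length →
    anchor ≤ i →
    (∀ y : Int, rem.getD y 0 = ((arr.drop i).count y : Int)) →
    active = ((pvCross arr i).card : Int) →
    (∀ j : Nat, j < anchor → pvL arr j < (anchor : Int)) →
    ((i = anchor ∧ endv = -1 ∧ count = 1)
      ∨ (anchor < i ∧ (i : Int) ≤ endv ∧ endv < (arr.length : Int)
          ∧ count = (i : Int) - (anchor : Int) + 1
          ∧ (∃ k : Nat, anchor ≤ k ∧ k < i ∧ pvL arr k = endv)
          ∧ (∀ j : Nat, anchor ≤ j → j < i → pvL arr j ≤ endv))) →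
    pvLoopA arr (pvBuildDic arr) res (i : Int) endv count
      = pvLoopC (pvBuildTotal arr) ((PySem.List.enumerate arr 0).drop i) rem res active (anchor : Int) := by
  induction fuel with
  | zero =>
    intro arr i anchor res endv count rem active hfuel hilen hai hrem hact hI hinv
    have hieq : i = arr.length := by omega
    rw [pvLoopA]
    rw [dif_neg (by exact_mod_cast by omega : ¬ ((i : Int) < (arr.length : Int)))]
    rw [List.drop_eq_nil_of_le (by simp [PySem.List.length_enumerate]; omega)]
    rfl
  | succ fuel ih =>
    intro arr i anchor res endv count rem active hfuel hilen hai hrem hact hI hinv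
    have hlt : i < arr.length := by omega
    have hL_ge := pvL_ge arr i hlt
    have hL_lt := pvL_lt_len arr i hlt
    set x := arr.getD i 0 with hxdef
    -- one step of A
    rw [pvLoopA, dif_pos (by exact_mod_cast hlt)]
    simp only [PySem.List.pyGetD_natCast, pvBuildDic_getD, pvNeg_one_occ arr i hlt]
    -- one step of B
    rw [pvEnum_drop arr i hlt, pvLoopC]
    -- evaluate B's two count tests
    have hdropc := pvDrop_cons arr i hlt
    rw [← hxdef] at hdropc
    have hc1 : (rem.getD x 0 = (pvBuildTotal arr).getD x 0) ↔ x ∉ arr.take i := by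
      rw [hrem x, pvBuildTotal_getD]
      rw [← pvCount_take_add_drop arr i x, ← List.count_eq_zero]
      constructor
      · intro h; omega
      · intro h; omega
    have hrem' : ∀ y : Int, (rem.insert x (rem.getD x 0 - 1)).getD y 0
        = ((arr.drop (i + 1)).count y : Int) := by
      intro y
      by_cases hy : y = x
      · subst hy
        rw [PySem.Dict.getD_insert_self, hrem x, hdropc, List.count_cons_self]
        push_cast; ring
      · rw [PySem.Dict.getD_insert_of_ne _ _ _ hy, hrem y, hdropc,
          List.count_cons_of_ne (fun h => hy h.symm)]
    have hc2 : ((rem.insert x (rem.getD x 0 - 1)).getD x 0 = 0) ↔ x ∉ arr.drop (i + 1) := by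
      rw [hrem' x, ← List.count_eq_zero]
      constructor
      · intro h
        have := @Int.natCast_eq_zero ((arr.drop (i + 1)).count x)
        omega
      · intro h; rw [h]; rfl
    -- the updated active counter is the cardinality of the next cross set
    have hcard : (if (rem.insert x (rem.getD x 0 - 1)).getD x 0 = 0 then
          (if rem.getD x 0 = (pvBuildTotal arr).getD x 0 then active + 1 else active) - 1
        else (if rem.getD x 0 = (pvBuildTotal arr).getD x 0 then active + 1 else active))
        = ((pvCross arr (i + 1)).card : Int) := by
      have hT : pvCross arr (i + 1)
          = ((arr.take i).toFinset ∪ {x}) ∩ (arr.drop (i + 1)).toFinset := by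
        unfold pvCross
        rw [pvTake_succ arr i hlt, ← hxdef]
        simp [List.toFinset_append]
      have hD : pvCross arr i
          = (arr.take i).toFinset ∩ insert x (arr.drop (i + 1)).toFinset := by
        unfold pvCross
        rw [hdropc]
        simp
      rw [hT, hact, hD]
      rw [pvCardStep ((arr.take i).toFinset) ((arr.drop (i + 1)).toFinset) x]
      by_cases h1 : x ∈ arr.take i <;> by_cases h2 : x ∈ arr.drop (i + 1)
      · rw [if_neg (by rw [hc2]; simp [h2]), if_neg (by rw [hc1]; simp [h1])]
        simp [h1, h2]
      · rw [if_pos (by rw [hc2]; simp [h2]), if_neg (by rw [hc1]; simp [h1])]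
        simp [h1, h2]
      · rw [if_neg (by rw [hc2]; simp [h2]), if_pos (by rw [hc1]; simp [h1])]
        simp [h1, h2]
      · rw [if_pos (by rw [hc2]; simp [h2]), if_pos (by rw [hc1]; simp [h1])]
        simp [h1, h2]
    simp only [← hxdef]
    simp only [hcard]
    -- B closes exactly when no value crosses the cut after i
    have hcloseiff : (((pvCross arr (i + 1)).card : Int) = 0)
        ↔ ∀ j : Nat, j ≤ i → pvL arr j ≤ (i : Int) := by
      rw [← pvCross_empty_iff arr i hlt, ← Finset.card_eq_zero]
      constructor
      · intro h
        have := @Int.natCast_eq_zero ((pvCross arr (i + 1)).card)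
        omega
      · intro h; rw [h]; rfl
    rcases hinv with ⟨heq, rfl, rfl⟩ | ⟨halt, hie, hel, hc, ⟨k0, hk0a, hk0i, hk0L⟩, hall⟩
    · -- fresh state: i = anchor, endv = -1, count = 1
      subst heq
      rw [if_neg (by omega : ¬ ((i : Int) = -1))]
      by_cases huniq : (pvOcc arr x).length = 1
      · -- arr[i] occurs exactly once: both emit a length-1 window
        have hLi : pvL arr i = (i : Int) := by
          have hu := (pvOcc_len_one arr i hlt).1 huniq
          obtain ⟨m, hm, hme, hmeq⟩ := pvL_mem arr i hlt
          have := hu m hm hmeq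
          omega
        have hclose : ((pvCross arr (i + 1)).card : Int) = 0 := by
          rw [hcloseiff]
          intro j hj
          rcases Nat.lt_or_ge j i with hj' | hj'
          · have := hI j hj'; omega
          · have : j = i := by omega
            subst this; omega
        rw [if_pos ⟨rfl, huniq⟩, if_pos hclose]
        have hstep := ih arr (i + 1) (i + 1) (res ++ [1]) (-1) 1
          (rem.insert x (rem.getD x 0 - 1)) (((pvCross arr (i + 1)).card : Int))
          (by omega) (by omega) (le_refl _) hrem' rfl
          (by
            intro j hj
            rcases Nat.lt_succ_iff_lt_or_eq.1 hj with hj' | rfl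
            · have := hI j hj'; push_cast; omega
            · push_cast; omega)
          (Or.inl ⟨rfl, rfl, rfl⟩)
        push_cast at hstep
        rw [show (i : Int) - (i : Int) + 1 = (1 : Int) from by omega, hstep]
      · -- arr[i] recurs: open a window to its last occurrence
        have hLgt : (i : Int) < pvL arr i := by
          rcases eq_or_lt_of_le hL_ge with hLe | h'
          · exfalso
            apply huniq
            refine (pvOcc_len_one arr i hlt).2 ?_
            intro j hj he
            have h1 : (j : Int) ≤ pvL arr i := pvL_isLast arr i j hj he
            by_contra hne
            have hji : j < i := by omega
            have h2 := hI j hji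
            rw [pvL_congr arr i j he] at h2
            omega
          · exact h'
        have hnclose : ¬ (((pvCross arr (i + 1)).card : Int) = 0) := by
          rw [hcloseiff]
          push_neg
          exact ⟨i, le_refl _, by omega⟩
        rw [if_neg (fun hcon => huniq hcon.2), if_pos rfl, if_neg hnclose]
        have hstep := ih arr (i + 1) i res (pvL arr i) (1 + 1)
          (rem.insert x (rem.getD x 0 - 1)) (((pvCross arr (i + 1)).card : Int))
          (by omega) (by omega) (by omega) hrem' rfl hI
          (Or.inr ⟨by omega, by push_cast; omega, by omega, by push_cast; omega,
            ⟨i, le_refl _, by omega, rfl⟩,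
            by
              intro j hja hji
              have : j = i := by omega
              subst this
              omega⟩)
        push_cast at hstep
        rw [show (1 : Int) + 1 = (2 : Int) from rfl, hstep]
    · -- in-window state
      have hnneg : ¬ (endv = -1) := by omega
      -- arr[i]'s last occurrence never exceeds endv when the window closes here
      by_cases hclose : (i : Int) = endv
      · -- window closes exactly here
        have hLi : pvL arr i = (i : Int) := by
          obtain ⟨m, hm, hme, hmeq⟩ := pvL_mem arr k0 (by omega)
          have hmi : m = i := by omega
          rw [hmi] at hmeq
          rw [pvL_congr arr k0 i hmeq]
          omega
        have hcl : ((pvCross arr (i + 1)).card : Int) = 0 := by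
          rw [hcloseiff]
          intro j hj
          rcases Nat.lt_or_ge j anchor with hja | hja
          · have := hI j hja; omega
          · rcases Nat.lt_or_ge j i with hji | hji
            · have := hall j hja hji; omega
            · have : j = i := by omega
              subst this; omega
        rw [if_pos hclose, if_pos hcl]
        rw [show (i : Int) - (anchor : Int) + 1 = count from by omega]
        have hstep := ih arr (i + 1) (i + 1) (res ++ [count]) (-1) 1
          (rem.insert x (rem.getD x 0 - 1)) (((pvCross arr (i + 1)).card : Int))
          (by omega) (by omega) (le_refl _) hrem' rfl
          (by
            intro j hj
            rcases Nat.lt_succ_iff_lt_or_eq.1 hj with hj' | rfl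
            · rcases Nat.lt_or_ge j anchor with hja | hja
              · have := hI j hja; push_cast; omega
              · have := hall j hja hj'; push_cast; omega
            · push_cast; omega)
          (Or.inl ⟨rfl, rfl, rfl⟩)
        push_cast at hstep
        rw [hstep]
      · -- window continues: i < endv
        have hilt : (i : Int) < endv := by omega
        have hncl : ¬ (((pvCross arr (i + 1)).card : Int) = 0) := by
          rw [hcloseiff]
          push_neg
          exact ⟨k0, by omega, by omega⟩
        rw [if_neg hclose, if_neg (fun hcon => hnneg hcon.1), if_neg hnneg, if_neg hncl]
        have hstep := ih arr (i + 1) anchor res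
          (if pvL arr i > endv then pvL arr i else endv) (count + 1)
          (rem.insert x (rem.getD x 0 - 1)) (((pvCross arr (i + 1)).card : Int))
          (by omega) (by omega) (by omega) hrem' rfl hI
          (Or.inr ⟨by omega,
            by split_ifs <;> push_cast <;> omega,
            by split_ifs <;> omega,
            by push_cast; omega,
            (by
              by_cases hle : pvL arr i ≤ endv
              · refine ⟨k0, hk0a, by omega, ?_⟩
                split_ifs <;> omega
              · refine ⟨i, by omega, by omega, ?_⟩
                split_ifs <;> omega),
            by
              intro j hja hji
              rcases Nat.lt_succ_iff_lt_or_eq.1 hji with hj' | rfl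
              · have := hall j hja hj'
                split_ifs <;> omega
              · split_ifs <;> omega⟩)
        push_cast at hstep
        rw [hstep]

-- ===== VERDICT (by name: the statement is the Claim_ definition above) =====
theorem createWin_spec : Claim_equal_createWin := by
  intro arr _
  unfold Spec_createWin createWin createWin_alt
  have h := pvLockstep (arr.length) arr 0 0 [] (-1) 1 (pvBuildTotal arr) 0
    (by omega) (by omega) (by omega)
    (by intro y; rw [pvBuildTotal_getD]; rfl)
    (by unfold pvCross; simp)
    (by intro j hj; omega)
    (Or.inl ⟨rfl, rfl, rfl⟩)
  simpa using h
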